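-- pv_equiv track=rewrite | github.com/artni96/leetcode | test.py | list_superset
-- ===== SOURCE A (Python) =====
-- def list_superset(list_1, list_2):
--     counter = 0
--     for outer_i in list_1:
--         for inner_i in list_2:
--             if outer_i == inner_i:
--                 counter += 1
--     if counter == (len(list_2)) == len(list_1):
--         return "Наборы равны"
--     elif counter == (len(list_1)):
--         return f"Набор {list_2} супермножество."
--     elif counter == (len(list_2)):
--         return f"Набор {list_1} супермножество."
--
--     return "Супермножество не обнаружено."
-- ===== SOURCE B (Python) =====
-- def list_superset(list_1, list_2):
--     freq_1 = {}
--     for x in list_1: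
--         freq_1[x] = freq_1.get(x, 0) + 1
--     freq_2 = {}
--     for x in list_2:
--         freq_2[x] = freq_2.get(x, 0) + 1
--     counter = 0
--     for value, mult in freq_1.items():
--         counter += mult * freq_2.get(value, 0)
--     verdicts = {
--         (True, True): "Наборы равны",
--         (True, False): f"Набор {list_2} супермножество.",
--         (False, True): f"Набор {list_1} супермножество.",
--         (False, False): "Супермножество не обнаружено.",
--     }
--     return verdicts[(counter == len(list_1), counter == len(list_2))]
-- ===== Notes on version B (the rewrite author's own statement) =====
-- stated objective: faster
-- what changed: Instead of A's nested all-pairs scan and if/elif chain, B builds frequency dicts of BOTH lists, computes the pair count as a sum of multiplicity products over list_1's distinct values only, and dispatches the verdict through a table keyed by the pair of boolean length tests.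
import Mathlib
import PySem

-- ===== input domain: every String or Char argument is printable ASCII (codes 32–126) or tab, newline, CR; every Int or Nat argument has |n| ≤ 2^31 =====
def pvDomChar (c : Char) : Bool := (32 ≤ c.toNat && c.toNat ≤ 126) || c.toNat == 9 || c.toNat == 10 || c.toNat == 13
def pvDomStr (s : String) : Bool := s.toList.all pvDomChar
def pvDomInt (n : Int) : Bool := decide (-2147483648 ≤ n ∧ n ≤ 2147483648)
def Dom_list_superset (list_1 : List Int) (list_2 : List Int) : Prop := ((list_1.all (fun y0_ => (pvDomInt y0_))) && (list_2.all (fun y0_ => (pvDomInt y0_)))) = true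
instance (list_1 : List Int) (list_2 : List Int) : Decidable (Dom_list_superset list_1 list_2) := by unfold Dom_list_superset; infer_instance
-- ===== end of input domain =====

-- B replaces A's nested O(n*m) pair scan with two frequency dicts, a product sum over distinct values of list_1, and a table dispatch on the two length tests (objective: faster).


-- shared formatting helper: Python f"{lst}" for a list of ints, e.g. "[1, 2]"
def pyReprIntList (xs : List Int) : String :=
  "[" ++ String.intercalate ", " (xs.map PySem.Int.toStr) ++ "]"

-- ===== PORT A =====
def list_superset (list_1 : List Int) (list_2 : List Int) : String :=
  let counter : Int :=
    list_1.foldl (fun c outer_i =>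
      list_2.foldl (fun c inner_i => if outer_i == inner_i then c + 1 else c) c) 0
  if counter = (list_2.length : Int) ∧ (list_2.length : Int) = (list_1.length : Int) then
    "Наборы равны"
  else if counter = (list_1.length : Int) then
    "Набор " ++ pyReprIntList list_2 ++ " супермножество."
  else if counter = (list_2.length : Int) then
    "Набор " ++ pyReprIntList list_1 ++ " супермножество."
  else
    "Супермножество не обнаружено."

-- ===== PORT B =====
def list_superset_alt (list_1 : List Int) (list_2 : List Int) : String :=
  let freq_1 : PySem.Dict Int Int :=
    list_1.foldl (fun d x => d.insert x (d.getD x 0 + 1)) PySem.Dict.empty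
  let freq_2 : PySem.Dict Int Int :=
    list_2.foldl (fun d x => d.insert x (d.getD x 0 + 1)) PySem.Dict.empty
  let counter : Int :=
    freq_1.items.foldl (fun c p => c + p.2 * freq_2.getD p.1 0) 0
  let verdicts : PySem.Dict (Bool × Bool) String := PySem.Dict.ofList
    [ ((true, true), "Наборы равны"),
      ((true, false), "Набор " ++ pyReprIntList list_2 ++ " супермножество."),
      ((false, true), "Набор " ++ pyReprIntList list_1 ++ " супермножество."),
      ((false, false), "Супермножество не обнаружено.") ]
  -- Python's verdicts[key]: all four keys are present, so the default is never taken
  verdicts.getD (counter == (list_1.length : Int), counter == (list_2.length : Int)) ""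

-- ===== PRECONDITION & SPEC =====
def Spec_list_superset (list_1 : List Int) (list_2 : List Int) (out : String) : Prop := out = list_superset_alt list_1 list_2
instance (list_1 : List Int) (list_2 : List Int) (out : String) : Decidable (Spec_list_superset list_1 list_2 out) := by unfold Spec_list_superset; infer_instance

-- ===== CLAIM =====
def Claim_equal_list_superset : Prop := ∀ (list_1 : List Int) (list_2 : List Int), Dom_list_superset list_1 list_2 → Spec_list_superset list_1 list_2 (list_superset list_1 list_2)

-- ===== LEMMAS AND PROOFS =====

-- folding c + g x equals c plus the sum of the mapped list
theorem foldl_add_sum {α : Type} (g : α → Int) (l : List α) (c : Int) :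
    l.foldl (fun c x => c + g x) c = c + (l.map g).sum := by
  induction l generalizing c with
  | nil => simp
  | cons h t ih => rw [List.foldl_cons, ih, List.map_cons, List.sum_cons]; ring

-- A's inner loop adds list_2.count x to the accumulator
theorem inner_loop_count (l2 : List Int) (x : Int) (c : Int) :
    l2.foldl (fun c y => if x == y then c + 1 else c) c = c + (l2.count x : Int) := by
  induction l2 generalizing c with
  | nil => rw [List.foldl_nil, List.count_nil]; omega
  | cons h t ih =>
    rw [List.foldl_cons, List.count_cons, ih]
    by_cases hx : x = h
    · have h1 : (x == h) = true := beq_iff_eq.mpr hx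
      have h2 : (h == x) = true := beq_iff_eq.mpr hx.symm
      rw [h1, h2, if_pos rfl, if_pos rfl]
      push_cast; ring
    · have h1 : (x == h) = false := beq_false_of_ne hx
      have h2 : (h == x) = false := beq_false_of_ne (fun e => hx e.symm)
      rw [h1, h2]
      simp only [Bool.false_eq_true, if_false]
      push_cast; ring

-- A's counter equals Σ_{x ∈ l1} l2.count x
theorem foldlA_eq (l1 l2 : List Int) (c : Int) :
    l1.foldl (fun c outer_i =>
      l2.foldl (fun c inner_i => if outer_i == inner_i then c + 1 else c) c) c =
    c + ((l1.map (fun x => (l2.count x : Int))).sum) := by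
  induction l1 generalizing c with
  | nil => simp
  | cons h t ih =>
    rw [List.foldl_cons, inner_loop_count, ih, List.map_cons, List.sum_cons]
    ring

-- summing (if k = h then f k else 0) over a Nodup list containing h gives f h
theorem sum_single (f : Int → Int) (h : Int) :
    ∀ (s : List Int), s.Nodup → h ∈ s →
      (s.map (fun k => if k = h then f k else 0)).sum = f h := by
  intro s
  induction s with
  | nil => intro _ hh; cases hh
  | cons a t ih =>
    intro hs hh
    rw [List.map_cons, List.sum_cons]
    rcases List.mem_cons.mp hh with heq | hmem
    · subst heq
      rw [if_pos rfl]
      have hz : (t.map (fun k => if k = h then f k else 0)).sum = 0 := by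
        apply List.sum_eq_zero
        intro x hx
        rcases List.mem_map.mp hx with ⟨k, hk, rfl⟩
        have hka : k ≠ h := fun e => (List.nodup_cons.mp hs).1 (e ▸ hk)
        simp [hka]
      rw [hz]; ring
    · have hne : a ≠ h := fun e => (List.nodup_cons.mp hs).1 (e ▸ hmem)
      rw [if_neg hne, ih (List.nodup_cons.mp hs).2 hmem]; ring

-- Σ over a Nodup superlist of count·f equals Σ over the list of f
theorem sum_count_mul (s : List Int) (hs : s.Nodup) (f : Int → Int) :
    ∀ (l : List Int), (∀ x ∈ l, x ∈ s) →
      (s.map (fun k => (l.count k : Int) * f k)).sum = (l.map f).sum := by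
  intro l
  induction l with
  | nil => intro _; simp
  | cons h t ih =>
    intro hl
    have hsplit : (s.map (fun k => ((h :: t).count k : Int) * f k)).sum
        = (s.map (fun k => (t.count k : Int) * f k)).sum
          + (s.map (fun k => if k = h then f k else 0)).sum := by
      rw [← List.sum_map_add]
      apply congrArg
      apply List.map_congr_left
      intro k _
      rw [List.count_cons]
      by_cases hk : k = h
      · subst hk; simp; ring
      · have hb : (k == h) = false := beq_false_of_ne hk
        have hhk : ¬ h = k := fun e => hk e.symm
        simp [hk, hhk]
    rw [hsplit, ih (fun x hx => hl x (List.mem_cons_of_mem _ hx)),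
        sum_single f h s hs (hl h List.mem_cons_self), List.map_cons, List.sum_cons]
    ring

-- B's counter equals Σ_{x ∈ l1} l2.count x
theorem foldlB_eq (l1 l2 : List Int) :
    ((l1.foldl (fun d x => d.insert x (d.getD x 0 + 1)) PySem.Dict.empty).items.foldl
      (fun c p => c + p.2 * (l2.foldl (fun d x => d.insert x (d.getD x 0 + 1)) PySem.Dict.empty).getD p.1 0) 0)
    = ((l1.map (fun x => (l2.count x : Int))).sum) := by
  rw [PySem.Dict.foldl_insert_getD_add_one_eq_counter,
      PySem.Dict.foldl_insert_getD_add_one_eq_counter,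
      PySem.Dict.items_counter]
  rw [List.foldl_map, foldl_add_sum, zero_add]
  have hmap : ((PySem.Set.ofList l1).map
      (fun k => ((k, (l1.count k : Int)).2 * (PySem.Dict.counter l2).getD (k, (l1.count k : Int)).1 0)))
      = (PySem.Set.ofList l1).map (fun k => (l1.count k : Int) * (l2.count k : Int)) := by
    apply List.map_congr_left
    intro k _
    simp [PySem.Dict.getD_counter]
  rw [hmap]
  have hnd : (PySem.Set.ofList l1).Nodup := by
    have := PySem.List.nodup_dedup l1
    rwa [PySem.List.dedup_eq_ofList] at this
  exact sum_count_mul (PySem.Set.ofList l1) hnd _ l1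
    (fun x hx => by
      have := (PySem.List.mem_dedup l1 x).mpr hx
      rwa [PySem.List.dedup_eq_ofList] at this)

-- ===== VERDICT =====
theorem list_superset_spec : Claim_equal_list_superset := by
  intro l1 l2 _
  unfold Spec_list_superset
  simp only [list_superset, list_superset_alt, foldlA_eq, foldlB_eq, zero_add]
  by_cases h1 : (l1.map (fun x => (l2.count x : Int))).sum = (l1.length : Int) <;>
  by_cases h2 : (l1.map (fun x => (l2.count x : Int))).sum = (l2.length : Int)
  · have hl : (l2.length : Int) = (l1.length : Int) := by rw [← h2, h1]
    simp [h1, hl, PySem.Dict.ofList, PySem.Dict.getD, PySem.Dict.get?, PySem.Dict.update,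
      PySem.Dict.insert, PySem.Dict.contains, PySem.Dict.empty]
  · have hne2 : ¬ ((l1.length : Int) = (l2.length : Int)) := fun e => h2 (h1.trans e)
    have hn : ¬ (l1.length = l2.length) := fun e => hne2 (by exact_mod_cast e)
    simp [h1, hne2, PySem.Dict.ofList, PySem.Dict.getD, PySem.Dict.get?, PySem.Dict.update,
      PySem.Dict.insert, PySem.Dict.contains, PySem.Dict.empty]
  · have hne : ¬ ((l2.length : Int) = (l1.length : Int)) := fun e => h1 (h2.trans e)
    simp [h2, hne, PySem.Dict.ofList, PySem.Dict.getD, PySem.Dict.get?, PySem.Dict.update,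
      PySem.Dict.insert, PySem.Dict.contains, PySem.Dict.empty]
  · simp [h1, h2, PySem.Dict.ofList, PySem.Dict.getD, PySem.Dict.get?, PySem.Dict.update,
      PySem.Dict.insert, PySem.Dict.contains, PySem.Dict.empty]
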